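-- pv_equiv track=rewrite | github.com/daoyou-zhang/memRagAgent | backend/daoyou/app/routes/defaultai_chat_new.py | _sse_data_lines
-- ===== SOURCE A (Python) =====
-- def _sse_data_lines(text: str) -> str:
--     """将多行文本转换为符合 SSE 规范的多行 data 帧。
--     每行以 'data: ' 前缀发送，末尾追加一个空行分隔事件。
--     """
--     try:
--         # 规范化：仅统一换行风格，不压缩多重换行，尽量保留 Markdown 段落
--         s = str(text or "").replace("\r\n", "\n").replace("\r", "\n")
--         lines = s.split("\n")
--         if not lines:
--             lines = [""]
--         # 每行以 data: 开头并换行，调用方负责在事件末尾再追加一个空行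
--         return "".join([f"data: {line}\n" for line in lines])
--     except Exception:
--         return f"data: {text}\n"
-- ===== SOURCE B (Python) =====
-- def _sse_data_lines(text: str) -> str:
--     try:
--         s = str(text or "").replace("\r\n", "\n").replace("\r", "\n")
--         return "data: " + s.replace("\n", "\ndata: ") + "\n"
--     except Exception:
--         return f"data: {text}\n"
-- ===== Notes on version B (the rewrite author's own statement) =====
-- stated objective: idiomatic
-- what changed: Replaces split-into-lines plus a per-line f-string comprehension and join with a single substring substitution: after the same newline normalization, B returns 'data: ' + s.replace('\n', '\ndata: ') + '\n'.
import Mathlib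
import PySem

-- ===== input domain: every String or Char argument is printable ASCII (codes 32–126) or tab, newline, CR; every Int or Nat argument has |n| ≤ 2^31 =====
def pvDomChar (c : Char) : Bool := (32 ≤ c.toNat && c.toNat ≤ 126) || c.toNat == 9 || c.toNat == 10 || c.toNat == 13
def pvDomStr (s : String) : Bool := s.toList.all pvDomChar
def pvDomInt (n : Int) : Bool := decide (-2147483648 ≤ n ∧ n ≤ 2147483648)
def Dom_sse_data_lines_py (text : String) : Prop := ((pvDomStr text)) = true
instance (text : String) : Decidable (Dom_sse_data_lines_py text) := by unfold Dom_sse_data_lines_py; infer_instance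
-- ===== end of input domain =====

-- B replaces A's split-into-lines + per-line comprehension + join with a single
-- substring substitution ("data: " ++ s.replace "\n" "\ndata: " ++ "\n"); idiomatic, same cost.


-- ===== PORT A =====
-- literal port: `text or ""` (identity on strings, kept as the if), normalize \r\n and \r,
-- split on '\n', dead `if not lines` guard kept, then join of the per-line frames.
def sse_data_lines_py (text : String) : String :=
  let s := PySem.Str.replace (PySem.Str.replace (if text = "" then "" else text) "\r\n" "\n") "\r" "\n"
  let lines := PySem.Chars.splitOn s.toList "\n".toList
  let lines := if lines = [] then [[]] else lines
  String.ofList (PySem.Chars.join [] (lines.map (fun line => "data: ".toList ++ line ++ "\n".toList)))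

-- ===== PORT B =====
-- literal port of Source B: same normalization, then one substitution and concatenation.
def sse_data_lines_py_alt (text : String) : String :=
  let s := PySem.Str.replace (PySem.Str.replace (if text = "" then "" else text) "\r\n" "\n") "\r" "\n"
  String.ofList ("data: ".toList ++ PySem.Chars.replace s.toList "\n".toList "\ndata: ".toList ++ "\n".toList)

-- ===== PRECONDITION & SPEC =====
def Spec_sse_data_lines_py (text : String) (out : String) : Prop := out = sse_data_lines_py_alt text
instance (text : String) (out : String) : Decidable (Spec_sse_data_lines_py text out) := by unfold Spec_sse_data_lines_py; infer_instance

-- ===== CLAIM (what is proved, stated in full; the proofs are below) =====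
def Claim_equal_sse_data_lines_py : Prop := ∀ (text : String), Dom_sse_data_lines_py text → Spec_sse_data_lines_py text (sse_data_lines_py text)

-- ===== LEMMAS AND PROOFS =====

-- simple reference versions of split-on-'\n' and replace-'\n' used only in the proofs
def pvSplitNL : List Char → List (List Char)
  | [] => [[]]
  | c :: t =>
    if c = '\n' then [] :: pvSplitNL t
    else match pvSplitNL t with
      | [] => [[c]]
      | h :: r => (c :: h) :: r

def pvRepl (nw : List Char) : List Char → List Char
  | [] => []
  | c :: t => if c = '\n' then nw ++ pvRepl nw t else c :: pvRepl nw t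

lemma pvSplitNL_ne_nil (cs : List Char) : pvSplitNL cs ≠ [] := by
  cases cs with
  | nil => simp [pvSplitNL]
  | cons c t =>
    simp only [pvSplitNL]
    split
    · simp
    · split <;> simp

lemma splitGo_spec (fuel : Nat) (cs cur : List Char) (acc : List (List Char))
    (h : cs.length < fuel) :
    PySem.Chars.splitOn.go ['\n'] fuel cs cur acc =
      acc.reverse ++ (match pvSplitNL cs with
        | [] => [cur.reverse]
        | hd :: r => (cur.reverse ++ hd) :: r) := by
  induction fuel generalizing cs cur acc with
  | zero => omega
  | succ f ih =>
    cases cs with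
    | nil =>
      show (cur.reverse :: acc).reverse = _
      simp [pvSplitNL]
    | cons c t =>
      show (if List.isPrefixOf ['\n'] (c :: t) = true then
              PySem.Chars.splitOn.go ['\n'] f (List.drop (List.length ['\n']) (c :: t)) [] (cur.reverse :: acc)
            else PySem.Chars.splitOn.go ['\n'] f t (c :: cur) acc) = _
      by_cases hc : c = '\n'
      · subst hc
        simp only [List.isPrefixOf, if_pos, beq_self_eq_true, Bool.true_and,
          if_true, List.length_cons, List.length_nil, List.drop_succ_cons, List.drop_zero]
        rw [ih t [] (cur.reverse :: acc) (by simpa using h)]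
        have hne := pvSplitNL_ne_nil t
        cases hspl : pvSplitNL t with
        | nil => exact absurd hspl hne
        | cons hd r => simp [pvSplitNL, hspl]
      · have hpre : List.isPrefixOf ['\n'] (c :: t) = false := by
          simp [List.isPrefixOf]; intro hEq; exact absurd hEq.symm hc
        rw [hpre]
        simp only [Bool.false_eq_true, if_false]
        rw [ih t (c :: cur) acc (by simpa using h)]
        have hne := pvSplitNL_ne_nil t
        cases hspl : pvSplitNL t with
        | nil => exact absurd hspl hne
        | cons hd r => simp [pvSplitNL, hspl, hc]

lemma replGo_spec (nw : List Char) (fuel : Nat) (cs acc : List Char)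
    (h : cs.length ≤ fuel) :
    PySem.Chars.replace.go ['\n'] nw fuel cs acc = acc.reverse ++ pvRepl nw cs := by
  induction fuel generalizing cs acc with
  | zero =>
    cases cs with
    | nil => show acc.reverse ++ [] = _; simp [pvRepl]
    | cons c t => simp at h
  | succ f ih =>
    cases cs with
    | nil =>
      show acc.reverse = _
      simp [pvRepl]
    | cons c t =>
      show (if List.isPrefixOf ['\n'] (c :: t) = true then
              PySem.Chars.replace.go ['\n'] nw f (List.drop (List.length ['\n']) (c :: t)) (nw.reverse ++ acc)
            else PySem.Chars.replace.go ['\n'] nw f t (c :: acc)) = _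
      by_cases hc : c = '\n'
      · subst hc
        simp only [List.isPrefixOf, beq_self_eq_true, Bool.true_and,
          if_true, List.length_cons, List.length_nil, List.drop_succ_cons, List.drop_zero]
        rw [ih t (nw.reverse ++ acc) (by simpa using h)]
        simp [pvRepl]
      · have hpre : List.isPrefixOf ['\n'] (c :: t) = false := by
          simp [List.isPrefixOf]; intro hEq; exact absurd hEq.symm hc
        rw [hpre]
        simp only [Bool.false_eq_true, if_false]
        rw [ih t (c :: acc) (by simpa using h)]
        simp [pvRepl, hc]

lemma splitOn_eq_pvSplitNL (cs : List Char) :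
    PySem.Chars.splitOn cs ['\n'] = pvSplitNL cs := by
  show PySem.Chars.splitOn.go ['\n'] (cs.length + 1) cs [] [] = _
  rw [splitGo_spec (cs.length + 1) cs [] [] (by omega)]
  have hne := pvSplitNL_ne_nil cs
  cases hspl : pvSplitNL cs with
  | nil => exact absurd hspl hne
  | cons hd r => simp

lemma replace_eq_pvRepl (nw cs : List Char) :
    PySem.Chars.replace cs ['\n'] nw = pvRepl nw cs := by
  show PySem.Chars.replace.go ['\n'] nw cs.length cs [] = _
  rw [replGo_spec nw cs.length cs [] (le_refl _)]
  simp

lemma join_nil_cons (x : List Char) (xs : List (List Char)) :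
    PySem.Chars.join [] (x :: xs) = x ++ PySem.Chars.join [] xs := by
  cases xs <;> simp [PySem.Chars.join, List.intercalate]

lemma main_lemma (cs : List Char) :
    PySem.Chars.join [] ((pvSplitNL cs).map (fun line => "data: ".toList ++ line ++ "\n".toList)) =
      "data: ".toList ++ pvRepl ("\ndata: ".toList) cs ++ "\n".toList := by
  induction cs with
  | nil => simp [pvSplitNL, pvRepl, PySem.Chars.join, List.intercalate]
  | cons c t ih =>
    by_cases hc : c = '\n'
    · subst hc
      simp only [pvSplitNL, if_true, List.map_cons, pvRepl]
      rw [join_nil_cons, ih]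
      simp
    · have hne := pvSplitNL_ne_nil t
      cases hspl : pvSplitNL t with
      | nil => exact absurd hspl hne
      | cons hd r =>
        simp only [pvSplitNL, hc, if_false, hspl]
        rw [hspl, List.map_cons, join_nil_cons] at ih
        simp only [List.map_cons]
        rw [join_nil_cons]
        have hih : hd ++ ("\n".toList ++ PySem.Chars.join [] (r.map (fun line => "data: ".toList ++ line ++ "\n".toList))) = pvRepl ("\ndata: ".toList) t ++ "\n".toList := by
          have := ih
          simp only [List.append_assoc] at this
          exact List.append_cancel_left this
        simp only [pvRepl, hc, if_false, List.append_assoc, List.cons_append]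
        simp only [List.append_assoc] at hih ⊢
        rw [hih]

-- ===== VERDICT (by name: the statement is the Claim_ definition above) =====
theorem sse_data_lines_py_spec : Claim_equal_sse_data_lines_py := by
  intro text _
  unfold Spec_sse_data_lines_py sse_data_lines_py sse_data_lines_py_alt
  simp only []
  generalize (PySem.Str.replace (PySem.Str.replace (if text = "" then "" else text) "\r\n" "\n") "\r" "\n").toList = cs
  have h1 : PySem.Chars.splitOn cs "\n".toList = pvSplitNL cs := splitOn_eq_pvSplitNL cs
  have h2 : PySem.Chars.replace cs "\n".toList "\ndata: ".toList = pvRepl ("\ndata: ".toList) cs := replace_eq_pvRepl _ cs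
  rw [h1, h2, if_neg (by exact pvSplitNL_ne_nil cs)]
  rw [main_lemma cs]
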